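-- pv_equiv track=rewrite | github.com/informalsystems/modelator-py | modelator/util/parse/tlc/stdout_to_informal_trace_format.py | split_into_states
-- ===== SOURCE A (Python) =====
-- def split_into_states(trace) -> list[str]:
--     """
--     Returns a list of states.
--
--     A trace from TLC is a sequence of [header, content] pairs.
--     The headers are not valid TLA+.
--     This function returns a list where each item is valid TLA+ content.
--     """
--     ret = []
--     lines = trace.split("\n")
--     HEADER = "State "
--     header_cnt = 0
--     header_ix = -1
--     for i, line in enumerate(lines):
--         if line.startswith(HEADER):
--             if 0 < header_cnt:
--                 ret.append(lines[header_ix + 1 : i])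
--             header_ix = i
--             header_cnt += 1
--     if 0 < header_cnt:
--         ret.append(lines[header_ix + 1 :])
--
--     ret = ["\n".join(lines) for lines in ret]
--     return ret
-- ===== SOURCE B (Python) =====
-- def split_into_states(trace) -> list[str]:
--     """
--     Returns a list of states.
--
--     Collect the header line indices first, then emit each block as the
--     slice between consecutive headers (the last block runs to the end).
--     """
--     lines = trace.split("\n")
--     idxs = [i for i, line in enumerate(lines) if line.startswith("State ")]
--     ret = []
--     for j in range(len(idxs)):
--         end = idxs[j + 1] if j + 1 < len(idxs) else len(lines)
--         ret.append("\n".join(lines[idxs[j] + 1 : end]))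
--     return ret
-- ===== Notes on version B (the rewrite author's own statement) =====
-- stated objective: alternative
-- what changed: B first collects all header line indices in one pass, then builds each block by slicing between consecutive indices (last block to end-of-lines), replacing A's single pass with running previous-header-index/count state.
import Mathlib
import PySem

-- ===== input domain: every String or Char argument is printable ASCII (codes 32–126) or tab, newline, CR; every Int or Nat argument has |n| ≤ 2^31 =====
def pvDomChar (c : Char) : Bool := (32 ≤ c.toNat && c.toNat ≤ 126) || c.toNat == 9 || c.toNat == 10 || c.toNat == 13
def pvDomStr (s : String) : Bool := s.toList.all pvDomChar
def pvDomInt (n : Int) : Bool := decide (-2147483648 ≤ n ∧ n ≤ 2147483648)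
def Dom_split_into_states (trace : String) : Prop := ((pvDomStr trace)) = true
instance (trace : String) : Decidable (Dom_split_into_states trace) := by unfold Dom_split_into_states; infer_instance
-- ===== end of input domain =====

-- B replaces A's running previous-header-index/count loop state by a first pass collecting
-- the header line indices and a second pair-wise pass slicing between consecutive indices
-- (objective: alternative decomposition, same cost).

-- ===== PORT A =====
-- step of A's for-loop: state is (ret, header_ix, header_cnt)
def pvStepA (lines : List String) (s : List (List String) × Int × Int) (p : Int × String) :
    List (List String) × Int × Int :=
  if PySem.Str.startswith p.2 "State " then
    ((if 0 < s.2.2 then s.1 ++ [PySem.List.slice lines (some (s.2.1 + 1)) (some p.1)] else s.1),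
      p.1, s.2.2 + 1)
  else s

def split_into_states (trace : String) : List String :=
  let lines := (PySem.Str.split? (trace) "\n").getD []   -- split("\n"): sep ≠ "" so split? is some
  let st := (PySem.List.enumerate lines 0).foldl (pvStepA lines) ([], -1, 0)
  let ret := if 0 < st.2.2 then st.1 ++ [PySem.List.slice lines (some (st.2.1 + 1)) none] else st.1
  ret.map (fun ls => PySem.Str.join "\n" ls)

-- ===== PORT B =====
-- body of B's second pass: block for the j-th header index
def pvBlockB (lines : List String) (idxs : List Int) (j : Int) : String :=
  let e := if j + 1 < (idxs.length : Int) then PySem.List.pyGetD idxs (j + 1) 0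
           else (lines.length : Int)
  PySem.Str.join "\n" (PySem.List.slice lines (some (PySem.List.pyGetD idxs j 0 + 1)) (some e))

def split_into_states_alt (trace : String) : List String :=
  let lines := (PySem.Str.split? (trace) "\n").getD []
  let idxs := (PySem.List.enumerate lines 0).filterMap
    (fun p => if PySem.Str.startswith p.2 "State " then some p.1 else none)
  (PySem.List.pyRange 0 (idxs.length : Int) 1).foldl
    (fun ret j => ret ++ [pvBlockB lines idxs j]) []

-- ===== PRECONDITION & SPEC =====
def Spec_split_into_states (trace : String) (out : List String) : Prop := out = split_into_states_alt trace
instance (trace : String) (out : List String) : Decidable (Spec_split_into_states trace out) := by unfold Spec_split_into_states; infer_instance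

-- ===== CLAIM (what is proved, stated in full; the proofs are below) =====
def Claim_equal_split_into_states : Prop := ∀ (trace : String), Dom_split_into_states trace → Spec_split_into_states trace (split_into_states trace)

-- ===== LEMMAS AND PROOFS =====

-- A's loop step restricted to the header lines (the only ones that change the state)
def pvStepI (lines : List String) (s : List (List String) × Int × Int) (j : Int) :
    List (List String) × Int × Int :=
  ((if 0 < s.2.2 then s.1 ++ [PySem.List.slice lines (some (s.2.1 + 1)) (some j)] else s.1),
    j, s.2.2 + 1)

-- A's post-loop finalization
def pvFin (lines : List String) (st : List (List String) × Int × Int) : List (List String) :=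
  if 0 < st.2.2 then st.1 ++ [PySem.List.slice lines (some (st.2.1 + 1)) none] else st.1

-- the list of content blocks after a header at ix, given the remaining header indices
def pvBlocks (lines : List String) (ix : Int) : List Int → List (List String)
  | [] => [PySem.List.slice lines (some (ix + 1)) none]
  | j :: t => PySem.List.slice lines (some (ix + 1)) (some j) :: pvBlocks lines j t

-- a slice whose stop is exactly the length is a slice to the end
lemma pv_slice_len (xs : List String) (a : Int) :
    PySem.List.slice xs (some a) (some (xs.length : Int)) = PySem.List.slice xs (some a) none := by
  simp only [PySem.List.slice]
  rw [PySem.List.clampIdx_natCast, Nat.min_self]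

-- A's loop over the enumerated lines equals the restricted loop over the header indices only
lemma pv_foldA (lines : List String) (l : List (Int × String)) (s : List (List String) × Int × Int) :
    l.foldl (pvStepA lines) s
      = (l.filterMap (fun p => if PySem.Str.startswith p.2 "State " then some p.1 else none)).foldl
          (pvStepI lines) s := by
  induction l generalizing s with
  | nil => rfl
  | cons p t ih =>
    rw [List.foldl_cons]
    cases h : PySem.Str.startswith p.2 "State " with
    | true =>
      have hstep : pvStepA lines s p = pvStepI lines s p.1 := by
        simp only [pvStepA, pvStepI, h, reduceIte]
      rw [hstep, ih]
      simp only [List.filterMap_cons, h, reduceIte, List.foldl_cons]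
    | false =>
      have hstep : pvStepA lines s p = s := by
        simp only [pvStepA, h, Bool.false_eq_true, if_false]
      rw [hstep, ih]
      simp only [List.filterMap_cons, h, Bool.false_eq_true, if_false]

-- A's loop over the tail of the header-index list, once the first header has been seen
lemma pv_loopA (lines : List String) (js : List Int) :
    ∀ (r : List (List String)) (ix c : Int), 0 < c →
      pvFin lines (js.foldl (pvStepI lines) (r, ix, c)) = r ++ pvBlocks lines ix js := by
  induction js with
  | nil =>
    intro r ix c hc
    simp [pvFin, pvBlocks, if_pos hc]
  | cons j t ih =>
    intro r ix c hc
    have hstep : pvStepI lines (r, ix, c) j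
        = (r ++ [PySem.List.slice lines (some (ix + 1)) (some j)], j, c + 1) := by
      simp [pvStepI, if_pos hc]
    rw [List.foldl_cons, hstep, ih _ j (c + 1) (by omega)]
    simp [pvBlocks]

-- B's j-th block, read off the index list, for a Nat index
lemma pv_B_eq (lines : List String) (i0 : Int) (rest : List Int) :
    (List.range (rest.length + 1)).map (fun k : Nat => pvBlockB lines (i0 :: rest) (k : Int))
      = (pvBlocks lines i0 rest).map (PySem.Str.join "\n") := by
  induction rest generalizing i0 with
  | nil =>
    have h : pvBlockB lines [i0] ((0 : Nat) : Int)
        = PySem.Str.join "\n" (PySem.List.slice lines (some (i0 + 1)) none) := by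
      unfold pvBlockB
      rw [if_neg (by simp), PySem.List.pyGetD_natCast]
      simp [pv_slice_len]
    simp only [List.length_nil, Nat.zero_add, List.range_one, List.map_cons, List.map_nil, h]
    simp [pvBlocks]
  | cons j t ih =>
    have h0 : pvBlockB lines (i0 :: j :: t) ((0 : Nat) : Int)
        = PySem.Str.join "\n" (PySem.List.slice lines (some (i0 + 1)) (some j)) := by
      unfold pvBlockB
      rw [if_pos (by simp only [List.length_cons]; push_cast; omega)]
      have e1 : ((0 : Nat) : Int) + 1 = ((1 : Nat) : Int) := by norm_num
      rw [e1, PySem.List.pyGetD_natCast, PySem.List.pyGetD_natCast]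
      simp
    have hs : ∀ k : Nat, pvBlockB lines (i0 :: j :: t) ((k + 1 : Nat) : Int)
        = pvBlockB lines (j :: t) ((k : Nat) : Int) := by
      intro k
      unfold pvBlockB
      have e2 : ((k + 1 : Nat) : Int) + 1 = ((k + 2 : Nat) : Int) := by push_cast; ring
      have e1 : ((k : Nat) : Int) + 1 = ((k + 1 : Nat) : Int) := by push_cast; ring
      have hcond : (((k + 1 : Nat) : Int) + 1 < ((i0 :: j :: t).length : Int))
          ↔ (((k : Nat) : Int) + 1 < ((j :: t).length : Int)) := by
        simp only [List.length_cons]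
        push_cast
        omega
      have hidx1 : PySem.List.pyGetD (i0 :: j :: t) ((k + 1 : Nat) : Int) 0
          = PySem.List.pyGetD (j :: t) ((k : Nat) : Int) 0 := by
        rw [PySem.List.pyGetD_natCast, PySem.List.pyGetD_natCast]
        simp
      have hidx2 : PySem.List.pyGetD (i0 :: j :: t) (((k + 1 : Nat) : Int) + 1) 0
          = PySem.List.pyGetD (j :: t) (((k : Nat) : Int) + 1) 0 := by
        rw [e2, e1, PySem.List.pyGetD_natCast, PySem.List.pyGetD_natCast]
        simp
      by_cases hc : ((k : Nat) : Int) + 1 < ((j :: t).length : Int)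
      · rw [if_pos (hcond.mpr hc), if_pos hc, hidx1, hidx2]
      · rw [if_neg (fun hh => hc (hcond.mp hh)), if_neg hc, hidx1]
    have hmap : (List.range (t.length + 1)).map
          ((fun k : Nat => pvBlockB lines (i0 :: j :: t) (k : Int)) ∘ Nat.succ)
        = (List.range (t.length + 1)).map (fun k : Nat => pvBlockB lines (j :: t) (k : Int)) :=
      List.map_congr_left (fun k _ => hs k)
    rw [List.length_cons, List.range_succ_eq_map, List.map_cons, List.map_map, hmap]
    simp only [h0]
    rw [ih j]
    simp [pvBlocks]

-- the whole equality, for a fixed line list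
lemma pv_main (lines : List String) :
    (pvFin lines ((PySem.List.enumerate lines 0).foldl (pvStepA lines) ([], -1, 0))).map
        (fun ls => PySem.Str.join "\n" ls)
      = (PySem.List.pyRange 0 ((((PySem.List.enumerate lines 0).filterMap
            (fun p => if PySem.Str.startswith p.2 "State " then some p.1 else none)).length : Nat) : Int) 1).foldl
          (fun ret j => ret ++ [pvBlockB lines ((PySem.List.enumerate lines 0).filterMap
            (fun p => if PySem.Str.startswith p.2 "State " then some p.1 else none)) j]) [] := by
  rw [pv_foldA]
  rw [PySem.List.foldl_append_singleton_eq_map, List.nil_append]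
  generalize ((PySem.List.enumerate lines 0).filterMap
    (fun p => if PySem.Str.startswith p.2 "State " then some p.1 else none)) = idxs
  rw [PySem.List.pyRange_one]
  simp only [Int.sub_zero, Int.toNat_natCast, List.map_map]
  cases idxs with
  | nil => simp [pvFin]
  | cons i0 rest =>
    have h1 : pvStepI lines ([], -1, 0) i0 = ([], i0, 1) := by
      simp [pvStepI]
    rw [List.foldl_cons, h1, pv_loopA lines rest [] i0 1 (by omega), List.nil_append]
    rw [← pv_B_eq lines i0 rest]
    simp only [List.length_cons]
    apply List.map_congr_left
    intro k _
    simp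

-- ===== VERDICT (by name: the statement is the Claim_ definition above) =====
theorem split_into_states_spec : Claim_equal_split_into_states := by
  intro trace _
  exact pv_main ((PySem.Str.split? (trace) "\n").getD [])
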